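-- pv_equiv track=rewrite | github.com/hasanalpdoyduk/CS104 | CS104/CS104_Hw5_Answ1my.py | func2
-- ===== SOURCE A (Python) =====
-- A = [2, 3, 4, 5, 6, 7, 8]
--
-- B = [7, 8, 9, 10]
--
-- def func2(x):
--     n = ""
--     e = 0
--     f = 0
--     for i in A:
--         if i == x:
--             n += "1"
--         else:
--            n += "0"
--     for i in B:
--         if i == x:
--             n += "2"
--         else:
--             n += "3"
--     for i in n:
--         if i == "1":
--             e += 1
--     for i in n:
--         if i == "2":
--             f += 2
--     if e == 1 and f != 2:
--         return True
--     elif e != 1 and f == 2: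
--         return True
-- ===== SOURCE B (Python) =====
-- A = [2, 3, 4, 5, 6, 7, 8]
--
-- B = [7, 8, 9, 10]
--
-- def func2(x):
--     a = x in A
--     b = x in B
--     return True if a != b else None
-- ===== Notes on version B (the rewrite author's own statement) =====
-- stated objective: simpler
-- what changed: Replaces A's encode-to-string plus four counting loops with two direct membership tests and an XOR (True if in exactly one list, else None).
import Mathlib
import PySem

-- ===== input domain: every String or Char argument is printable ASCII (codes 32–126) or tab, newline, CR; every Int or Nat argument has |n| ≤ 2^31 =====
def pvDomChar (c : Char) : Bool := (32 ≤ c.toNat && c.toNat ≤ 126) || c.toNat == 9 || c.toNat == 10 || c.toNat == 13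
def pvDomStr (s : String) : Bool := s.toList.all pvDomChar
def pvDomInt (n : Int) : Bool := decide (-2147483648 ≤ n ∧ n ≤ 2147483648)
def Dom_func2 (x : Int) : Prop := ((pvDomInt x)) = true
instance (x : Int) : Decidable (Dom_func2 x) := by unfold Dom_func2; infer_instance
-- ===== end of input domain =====

-- B replaces A's string-encoding and four counting loops by two direct membership
-- tests combined with an XOR (simpler; identical result: True iff x is in exactly
-- one of the two constant lists, None otherwise).

-- ===== PORT A =====
-- literal transliteration: build the string n over both lists, count '1's into e
-- and add 2 to f per '2', then the two-branch return (implicit None → none).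
def func2 (x : Int) : Option Bool :=
  let n : List Char :=
    ([2, 3, 4, 5, 6, 7, 8] : List Int).foldl
      (fun s i => s ++ (if i = x then ['1'] else ['0'])) []
  let n : List Char :=
    ([7, 8, 9, 10] : List Int).foldl
      (fun s i => s ++ (if i = x then ['2'] else ['3'])) n
  let e : Int := n.foldl (fun e c => if c = '1' then e + 1 else e) 0
  let f : Int := n.foldl (fun f c => if c = '2' then f + 2 else f) 0
  if e = 1 ∧ f ≠ 2 then some true
  else if e ≠ 1 ∧ f = 2 then some true
  else none

-- ===== PORT B =====
def func2_alt (x : Int) : Option Bool :=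
  let a : Bool := decide (x ∈ ([2, 3, 4, 5, 6, 7, 8] : List Int))
  let b : Bool := decide (x ∈ ([7, 8, 9, 10] : List Int))
  if a ≠ b then some true else none

-- ===== PRECONDITION & SPEC =====
def Spec_func2 (x : Int) (out : Option Bool) : Prop := out = func2_alt x
instance (x : Int) (out : Option Bool) : Decidable (Spec_func2 x out) := by unfold Spec_func2; infer_instance

-- ===== CLAIM (what is proved, stated in full; the proofs are below) =====
def Claim_equal_func2 : Prop := ∀ (x : Int), Dom_func2 x → Spec_func2 x (func2 x)

-- ===== LEMMAS AND PROOFS =====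

-- outside both constant lists, both sides return none
theorem func2_outside (x : Int)
    (h2 : x ≠ 2) (h3 : x ≠ 3) (h4 : x ≠ 4) (h5 : x ≠ 5) (h6 : x ≠ 6)
    (h7 : x ≠ 7) (h8 : x ≠ 8) (h9 : x ≠ 9) (h10 : x ≠ 10) :
    func2 x = func2_alt x := by
  simp [func2, func2_alt, Ne.symm h2, Ne.symm h3, Ne.symm h4, Ne.symm h5, Ne.symm h6,
    Ne.symm h7, Ne.symm h8, Ne.symm h9, Ne.symm h10, h2, h3, h4, h5, h6, h7, h8, h9, h10]

-- ===== VERDICT (by name: the statement is the Claim_ definition above) =====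
theorem func2_spec : Claim_equal_func2 := by
  intro x _
  unfold Spec_func2
  by_cases h2 : x = 2; · subst h2; decide
  by_cases h3 : x = 3; · subst h3; decide
  by_cases h4 : x = 4; · subst h4; decide
  by_cases h5 : x = 5; · subst h5; decide
  by_cases h6 : x = 6; · subst h6; decide
  by_cases h7 : x = 7; · subst h7; decide
  by_cases h8 : x = 8; · subst h8; decide
  by_cases h9 : x = 9; · subst h9; decide
  by_cases h10 : x = 10; · subst h10; decide
  exact func2_outside x h2 h3 h4 h5 h6 h7 h8 h9 h10
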